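-- pv_equiv track=rewrite | github.com/rana-jatin/Mind-mate | chatbotAgent/memory_architecture.py | detect_data_type
-- ===== SOURCE A (Python) =====
-- from typing import Dict, List, Any, Optional, Union
--
-- def detect_data_type(input_data: Dict) -> str:
--     """Automatically detect the type of input data."""
--     if 'chat_history' in input_data or 'messages' in input_data:
--         return 'chat'
--     elif any(key in input_data for key in ['game_sessions', 'gameplay', 'achievements', 'player_actions']):
--         return 'game'
--     elif any(key in input_data for key in ['activities', 'events', 'actions']):
--         return 'activity'
--     elif any(key in input_data for key in ['lessons', 'courses', 'learning_progress']):
--         return 'learning'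
--     else:
--         return 'general'
-- ===== SOURCE B (Python) =====
-- _LABELS = ['chat', 'game', 'activity', 'learning', 'general']
--
-- _PRIORITY = {
--     'chat_history': 0, 'messages': 0,
--     'game_sessions': 1, 'gameplay': 1, 'achievements': 1, 'player_actions': 1,
--     'activities': 2, 'events': 2, 'actions': 2,
--     'lessons': 3, 'courses': 3, 'learning_progress': 3,
-- }
--
-- def detect_data_type(input_data):
--     """Automatically detect the type of input data."""
--     best = 4
--     for key in input_data:
--         p = _PRIORITY.get(key, 4)
--         if p < best:
--             best = p
--     return _LABELS[best]
-- ===== Notes on version B (the rewrite author's own statement) =====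
-- stated objective: alternative
-- what changed: Replaces the if/elif cascade of repeated membership scans over the dict with a single pass over the dict's keys that keeps the minimum priority from a key-to-priority table and indexes a label list once.
import Mathlib
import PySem

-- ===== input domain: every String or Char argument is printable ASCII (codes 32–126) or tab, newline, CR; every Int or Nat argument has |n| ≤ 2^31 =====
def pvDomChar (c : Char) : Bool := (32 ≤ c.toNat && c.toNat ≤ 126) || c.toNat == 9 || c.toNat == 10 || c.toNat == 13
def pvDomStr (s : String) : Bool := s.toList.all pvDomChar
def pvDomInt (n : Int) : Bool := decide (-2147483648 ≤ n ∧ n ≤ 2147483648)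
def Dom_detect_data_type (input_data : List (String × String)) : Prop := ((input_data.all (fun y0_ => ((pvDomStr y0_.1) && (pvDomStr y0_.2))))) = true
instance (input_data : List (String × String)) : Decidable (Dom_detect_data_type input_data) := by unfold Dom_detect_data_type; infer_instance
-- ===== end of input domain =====

set_option maxHeartbeats 1000000


-- B replaces the if/elif cascade of membership scans by one pass over the keys keeping the
-- minimum priority from a key→priority table, then indexing a label list (alternative decomposition).

-- ===== PORT A =====
-- literal transliteration of A's if/elif cascade; 'k in input_data' on a dict = key membership
def detect_data_type (input_data : List (String × String)) : String :=
  if input_data.any (fun p => p.1 == "chat_history") || input_data.any (fun p => p.1 == "messages") then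
    "chat"
  else if (["game_sessions", "gameplay", "achievements", "player_actions"].any
      (fun key => input_data.any (fun p => p.1 == key))) then
    "game"
  else if (["activities", "events", "actions"].any
      (fun key => input_data.any (fun p => p.1 == key))) then
    "activity"
  else if (["lessons", "courses", "learning_progress"].any
      (fun key => input_data.any (fun p => p.1 == key))) then
    "learning"
  else
    "general"

-- ===== PORT B =====
def pvLabels : List String := ["chat", "game", "activity", "learning", "general"]

def pvPriority : PySem.Dict String Int :=
  PySem.Dict.ofList [("chat_history", 0), ("messages", 0),
    ("game_sessions", 1), ("gameplay", 1), ("achievements", 1), ("player_actions", 1),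
    ("activities", 2), ("events", 2), ("actions", 2),
    ("lessons", 3), ("courses", 3), ("learning_progress", 3)]

-- the loop keeps best ∈ [0, 4], so _LABELS[best] never raises and the .getD "" default is unused
def detect_data_type_alt (input_data : List (String × String)) : String :=
  let best := input_data.foldl (fun best p =>
    let pr := pvPriority.getD p.1 4
    if pr < best then pr else best) 4
  (PySem.List.pyGet? pvLabels best).getD ""

-- ===== PRECONDITION & SPEC =====
def Spec_detect_data_type (input_data : List (String × String)) (out : String) : Prop := out = detect_data_type_alt input_data
instance (input_data : List (String × String)) (out : String) : Decidable (Spec_detect_data_type input_data out) := by unfold Spec_detect_data_type; infer_instance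

-- ===== CLAIM (what is proved, stated in full; the proofs are below) =====
def Claim_equal_detect_data_type : Prop := ∀ (input_data : List (String × String)), Dom_detect_data_type input_data → Spec_detect_data_type input_data (detect_data_type input_data)

-- ===== LEMMAS AND PROOFS =====

-- priority of one key (proof-side view of the table)
def pvG (k : String) : Int := pvPriority.getD k 4

lemma pvKeys : pvPriority.keys = ["chat_history", "messages",
    "game_sessions", "gameplay", "achievements", "player_actions",
    "activities", "events", "actions",
    "lessons", "courses", "learning_progress"] := by decide

lemma pvG_spec (k : String) : pvG k =
    if k = "chat_history" then 0 else if k = "messages" then 0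
    else if k = "game_sessions" then 1 else if k = "gameplay" then 1
    else if k = "achievements" then 1 else if k = "player_actions" then 1
    else if k = "activities" then 2 else if k = "events" then 2 else if k = "actions" then 2
    else if k = "lessons" then 3 else if k = "courses" then 3 else if k = "learning_progress" then 3
    else 4 := by
  split_ifs with h1 h2 h3 h4 h5 h6 h7 h8 h9 h10 h11 h12 <;>
    first
    | (subst_vars; decide)
    | · have hc : pvPriority.contains k = false := by
          rw [PySem.Dict.contains_eq_decide_mem_keys, pvKeys]
          simp_all
        rw [pvG, PySem.Dict.getD_of_not_contains _ _ hc]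

lemma pvG_bounds (k : String) : 0 ≤ pvG k ∧ pvG k ≤ 4 := by
  rw [pvG_spec]; split_ifs <;> omega

-- minimum priority of a list of items
def pvM (l : List (String × String)) : Int := l.foldr (fun p m => min (pvG p.1) m) 4

lemma pvM_le_four (l : List (String × String)) : pvM l ≤ 4 := by
  induction l with
  | nil => simp [pvM]
  | cons p t ih => simp only [pvM, List.foldr_cons] at *; omega

lemma pvM_nonneg (l : List (String × String)) : 0 ≤ pvM l := by
  induction l with
  | nil => simp [pvM]
  | cons p t ih =>
    have := (pvG_bounds p.1).1
    simp only [pvM, List.foldr_cons] at *; omega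

-- B's foldl computes min b (pvM l)
lemma foldl_eq_min_pvM (l : List (String × String)) (b : Int) (hb : b ≤ 4) :
    l.foldl (fun best p =>
      let pr := pvPriority.getD p.1 4
      if pr < best then pr else best) b = min b (pvM l) := by
  induction l generalizing b with
  | nil => simp [pvM]; omega
  | cons p t ih =>
    have hg := pvG_bounds p.1
    have h1 : (if pvG p.1 < b then pvG p.1 else b) = min b (pvG p.1) := by omega
    simp only [List.foldl_cons]
    show t.foldl _ (if pvG p.1 < b then pvG p.1 else b) = _
    rw [h1, ih (min b (pvG p.1)) (by omega)]
    simp only [pvM, List.foldr_cons]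
    omega

-- membership characterization: pvM l ≤ j ↔ some key has priority ≤ j (for j < 4)
lemma pvM_le_iff (l : List (String × String)) (j : Int) (hj : j < 4) :
    pvM l ≤ j ↔ ∃ p ∈ l, pvG p.1 ≤ j := by
  induction l with
  | nil => simp [pvM]; omega
  | cons p t ih =>
    simp only [pvM, List.foldr_cons, List.mem_cons] at *
    constructor
    · intro h
      rcases le_or_gt (pvG p.1) j with h1 | h1
      · exact ⟨p, Or.inl rfl, h1⟩
      · obtain ⟨q, hq, hq2⟩ := ih.1 (by omega)
        exact ⟨q, Or.inr hq, hq2⟩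
    · rintro ⟨q, hq | hq, hq2⟩
      · subst hq; omega
      · have := ih.2 ⟨q, hq, hq2⟩; omega

-- A's four conditions, characterized via pvG
lemma condC_iff (l : List (String × String)) :
    (l.any (fun p => p.1 == "chat_history") || l.any (fun p => p.1 == "messages")) = true ↔
      ∃ p ∈ l, pvG p.1 = 0 := by
  simp only [Bool.or_eq_true, List.any_eq_true, beq_iff_eq]
  constructor
  · rintro (⟨p, hp, he⟩ | ⟨p, hp, he⟩) <;> exact ⟨p, hp, by rw [pvG_spec, he]; simp⟩
  · rintro ⟨p, hp, he⟩
    rw [pvG_spec] at he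
    split_ifs at he with h1 h2 <;> first
      | exact Or.inl ⟨p, hp, h1⟩
      | exact Or.inr ⟨p, hp, h2⟩
      | omega

lemma condL_iff (l : List (String × String)) (keys : List String) (j : Int)
    (hk : ∀ k : String, pvG k = j ↔ k ∈ keys) :
    (keys.any (fun key => l.any (fun p => p.1 == key))) = true ↔ ∃ p ∈ l, pvG p.1 = j := by
  simp only [List.any_eq_true, beq_iff_eq]
  constructor
  · rintro ⟨k, hkm, p, hp, he⟩
    exact ⟨p, hp, by rw [he, hk]; exact hkm⟩
  · rintro ⟨p, hp, he⟩
    exact ⟨p.1, (hk p.1).1 he, p, hp, rfl⟩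

lemma keysG : ∀ k : String, pvG k = 1 ↔ k ∈ ["game_sessions", "gameplay", "achievements", "player_actions"] := by
  intro k; rw [pvG_spec]; split_ifs <;> simp_all

lemma keysA : ∀ k : String, pvG k = 2 ↔ k ∈ ["activities", "events", "actions"] := by
  intro k; rw [pvG_spec]; split_ifs <;> simp_all

lemma keysL : ∀ k : String, pvG k = 3 ↔ k ∈ ["lessons", "courses", "learning_progress"] := by
  intro k; rw [pvG_spec]; split_ifs <;> simp_all

-- "∃ priority = j" for the minimal j is the same as "min ≤ j" given nothing smaller
lemma exists_eq_of_min (l : List (String × String)) (j : Int) (h0 : 0 ≤ j) (hj : j < 4)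
    (hle : pvM l ≤ j) (hgt : ∀ i, 0 ≤ i → i < j → ¬ pvM l ≤ i) :
    ∃ p ∈ l, pvG p.1 = j := by
  obtain ⟨p, hp, hple⟩ := (pvM_le_iff l j hj).1 hle
  refine ⟨p, hp, ?_⟩
  by_contra hne
  have hlt : pvG p.1 < j := lt_of_le_of_ne hple hne
  have hg0 := (pvG_bounds p.1).1
  exact hgt (pvG p.1) hg0 hlt ((pvM_le_iff l (pvG p.1) (by omega)).2 ⟨p, hp, le_refl _⟩)

lemma alt_eq_label (l : List (String × String)) :
    detect_data_type_alt l = (PySem.List.pyGet? pvLabels (pvM l)).getD "" := by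
  unfold detect_data_type_alt
  rw [foldl_eq_min_pvM l 4 (le_refl 4)]
  rw [min_eq_right (pvM_le_four l)]

-- ===== VERDICT (by name: the statement is the Claim_ definition above) =====
theorem detect_data_type_spec : Claim_equal_detect_data_type := by
  intro l _
  unfold Spec_detect_data_type
  rw [alt_eq_label]
  have h0 := pvM_nonneg l
  have h4 := pvM_le_four l
  unfold detect_data_type
  by_cases hc : (l.any (fun p => p.1 == "chat_history") || l.any (fun p => p.1 == "messages")) = true
  · have hm : pvM l = 0 := by
      have := (pvM_le_iff l 0 (by omega)).2 (by
        obtain ⟨p, hp, he⟩ := (condC_iff l).1 hc; exact ⟨p, hp, le_of_eq he⟩)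
      omega
    rw [if_pos hc, hm]; decide
  · have hm0 : ¬ pvM l ≤ 0 := fun h => hc ((condC_iff l).2 (by
      obtain ⟨p, hp, he⟩ := (pvM_le_iff l 0 (by omega)).1 h
      exact ⟨p, hp, by have := (pvG_bounds p.1).1; omega⟩))
    rw [if_neg hc]
    by_cases hg : (["game_sessions", "gameplay", "achievements", "player_actions"].any
        (fun key => l.any (fun p => p.1 == key))) = true
    · have hm : pvM l = 1 := by
        have := (pvM_le_iff l 1 (by omega)).2 (by
          obtain ⟨p, hp, he⟩ := (condL_iff l _ 1 keysG).1 hg; exact ⟨p, hp, le_of_eq he⟩)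
        omega
      rw [if_pos hg, hm]; decide
    · have hm1 : ¬ pvM l ≤ 1 := fun h => hg ((condL_iff l _ 1 keysG).2
        (exists_eq_of_min l 1 (by omega) (by omega) h (by intro i hi1 hi2; omega)))
      rw [if_neg hg]
      by_cases ha : (["activities", "events", "actions"].any
          (fun key => l.any (fun p => p.1 == key))) = true
      · have hm : pvM l = 2 := by
          have := (pvM_le_iff l 2 (by omega)).2 (by
            obtain ⟨p, hp, he⟩ := (condL_iff l _ 2 keysA).1 ha; exact ⟨p, hp, le_of_eq he⟩)
          omega
        rw [if_pos ha, hm]; decide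
      · have hm2 : ¬ pvM l ≤ 2 := fun h => ha ((condL_iff l _ 2 keysA).2
          (exists_eq_of_min l 2 (by omega) (by omega) h (by intro i hi1 hi2; omega)))
        rw [if_neg ha]
        by_cases hl : (["lessons", "courses", "learning_progress"].any
            (fun key => l.any (fun p => p.1 == key))) = true
        · have hm : pvM l = 3 := by
            have := (pvM_le_iff l 3 (by omega)).2 (by
              obtain ⟨p, hp, he⟩ := (condL_iff l _ 3 keysL).1 hl; exact ⟨p, hp, le_of_eq he⟩)
            omega
          rw [if_pos hl, hm]; decide
        · have hm3 : ¬ pvM l ≤ 3 := fun h => hl ((condL_iff l _ 3 keysL).2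
            (exists_eq_of_min l 3 (by omega) (by omega) h (by intro i hi1 hi2; omega)))
          have hm : pvM l = 4 := by omega
          rw [if_neg hl, hm]; decide
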